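-- pv_equiv track=rewrite | github.com/SioKCronin/sio_dojo | Prep/question3.py | sorted_edge_weights
-- ===== SOURCE A (Python) =====
-- def sorted_edge_weights(graph):
--     edges = set()
--     for n1 in graph:
--         for link in graph[n1]:
--             n2 = link[0]
--             weight = link[1]
--             node_pair = tuple(sorted((n1, n2)))
--             edges.add((weight, node_pair))
--     return sorted(list(edges))
-- ===== SOURCE B (Python) =====
-- def sorted_edge_weights(graph):
--     # Online algorithm: maintain a sorted, duplicate-free result list and insert
--     # each weighted edge in place as it is discovered (no set, no final sort).
--     result = []
--     for n1 in graph: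
--         for link in graph[n1]:
--             n2, weight = link[0], link[1]
--             e = (weight, (n1, n2) if n1 <= n2 else (n2, n1))
--             i = 0
--             while i < len(result) and result[i] < e:
--                 i += 1
--             if i == len(result) or result[i] != e:
--                 result.insert(i, e)
--     return result
-- ===== Notes on version B (the rewrite author's own statement) =====
-- stated objective: alternative
-- what changed: Replaces A's offline collect-into-a-set-then-sort with an online insertion algorithm that keeps one sorted duplicate-free result list and splices each weighted edge into its position (skipping it if already present) as the graph is traversed.
import Mathlib
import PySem

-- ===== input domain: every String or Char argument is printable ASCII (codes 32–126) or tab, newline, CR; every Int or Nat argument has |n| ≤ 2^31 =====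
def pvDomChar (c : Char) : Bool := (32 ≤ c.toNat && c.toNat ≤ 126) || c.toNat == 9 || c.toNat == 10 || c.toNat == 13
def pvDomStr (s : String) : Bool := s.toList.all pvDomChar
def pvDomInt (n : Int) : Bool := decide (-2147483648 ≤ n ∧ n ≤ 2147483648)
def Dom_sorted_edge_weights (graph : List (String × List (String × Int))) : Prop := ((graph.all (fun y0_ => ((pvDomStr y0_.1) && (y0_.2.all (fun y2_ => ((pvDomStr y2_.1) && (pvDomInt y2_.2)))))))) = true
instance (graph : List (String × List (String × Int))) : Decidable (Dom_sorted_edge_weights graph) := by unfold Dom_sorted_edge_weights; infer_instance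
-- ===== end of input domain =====

-- B replaces A's offline set-dedup-then-sort with an online insertion algorithm: one sorted
-- duplicate-free result list maintained in place while the graph is traversed (objective:
-- alternative algorithm, same output).

-- Python compares tuples (weight, (lo, hi)) lexicographically; this injective key into the
-- lexicographic product order performs exactly those comparisons (both ports use it).
def pvEdgeKey (e : Int × (String × String)) : Lex (Int × Lex (String × String)) :=
  toLex (e.1, toLex e.2)

-- (n1, n2) if n1 <= n2 else (n2, n1) / tuple(sorted((n1, n2))): the smaller string first
def pvNodePair (n1 n2 : String) : String × String :=
  if n1 ≤ n2 then (n1, n2) else (n2, n1)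

-- ===== PORT A =====
def sorted_edge_weights (graph : List (String × List (String × Int))) : List (Int × (String × String)) :=
  let edges : PySem.Set (Int × (String × String)) :=
    graph.foldl (fun edges p =>
      p.2.foldl (fun edges link =>
        PySem.Set.add edges (link.2, pvNodePair p.1 link.1)) edges)
      PySem.Set.empty
  -- sorted(list(edges)): sorted over a Set with an injective key (tuple order) — order-exact
  PySem.List.sorted edges pvEdgeKey false

-- ===== PORT B =====
-- B's while-loop + list.insert: walk past the elements tuple-smaller than e, then insert e
-- unless the element at that position already equals e.
def pvInsertEdge (e : Int × (String × String)) : List (Int × (String × String)) → List (Int × (String × String))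
  | [] => [e]
  | x :: t =>
      if pvEdgeKey x < pvEdgeKey e then x :: pvInsertEdge e t
      else if x = e then x :: t
      else e :: x :: t

def sorted_edge_weights_alt (graph : List (String × List (String × Int))) : List (Int × (String × String)) :=
  graph.foldl (fun result p =>
    p.2.foldl (fun result link =>
      pvInsertEdge (link.2, pvNodePair p.1 link.1) result) result) []

-- ===== PRECONDITION & SPEC =====
def Spec_sorted_edge_weights (graph : List (String × List (String × Int))) (out : List (Int × (String × String))) : Prop := out = sorted_edge_weights_alt graph
instance (graph : List (String × List (String × Int))) (out : List (Int × (String × String))) : Decidable (Spec_sorted_edge_weights graph out) := by unfold Spec_sorted_edge_weights; infer_instance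

-- ===== CLAIM (what is proved, stated in full; the proofs are below) =====
def Claim_equal_sorted_edge_weights : Prop := ∀ (graph : List (String × List (String × Int))), Dom_sorted_edge_weights graph → Spec_sorted_edge_weights graph (sorted_edge_weights graph)

-- ===== LEMMAS AND PROOFS =====

theorem pvEdgeKey_injective : Function.Injective pvEdgeKey := by
  intro a b h
  have h' : (a.1, toLex a.2) = (b.1, toLex b.2) := congrArg ofLex h
  have h1 : a.1 = b.1 := congrArg Prod.fst h'
  have h2 : a.2 = b.2 := congrArg ofLex (congrArg Prod.snd h')
  exact Prod.ext h1 h2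

-- inserting e into a strictly key-sorted list keeps it strictly sorted and adds e's membership
theorem pvInsertEdge_spec (e : Int × (String × String)) :
    ∀ (acc : List (Int × (String × String))),
      acc.Pairwise (fun a b => pvEdgeKey a < pvEdgeKey b) →
      (pvInsertEdge e acc).Pairwise (fun a b => pvEdgeKey a < pvEdgeKey b) ∧
        (∀ x, x ∈ pvInsertEdge e acc ↔ x = e ∨ x ∈ acc) := by
  intro acc
  induction acc with
  | nil => intro _; simp [pvInsertEdge]
  | cons x t ih =>
    intro hp
    rw [List.pairwise_cons] at hp
    obtain ⟨hxlt, hpt⟩ := hp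
    by_cases hlt : pvEdgeKey x < pvEdgeKey e
    · obtain ⟨hP, hM⟩ := ih hpt
      simp only [pvInsertEdge, if_pos hlt]
      constructor
      · rw [List.pairwise_cons]
        refine ⟨fun y hy => ?_, hP⟩
        rcases (hM y).mp hy with rfl | hy
        · exact hlt
        · exact hxlt y hy
      · intro y
        simp only [List.mem_cons, hM y]
        tauto
    · by_cases heq : x = e
      · simp only [pvInsertEdge, if_neg hlt, if_pos heq]
        subst heq
        refine ⟨List.pairwise_cons.mpr ⟨hxlt, hpt⟩, fun y => ?_⟩
        simp only [List.mem_cons]; tauto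
      · have hke : pvEdgeKey e < pvEdgeKey x := by
          rcases lt_or_eq_of_le (not_lt.mp hlt) with h | h
          · exact h
          · exact absurd (pvEdgeKey_injective h.symm) heq
        simp only [pvInsertEdge, if_neg hlt, if_neg heq]
        constructor
        · rw [List.pairwise_cons]
          refine ⟨fun y hy => ?_, List.pairwise_cons.mpr ⟨hxlt, hpt⟩⟩
          rcases List.mem_cons.mp hy with rfl | hy
          · exact hke
          · exact lt_trans hke (hxlt y hy)
        · intro y; simp only [List.mem_cons]

-- folding the insertion over a list: still strictly sorted, members = acc ∪ l
theorem pv_insert_foldl_spec :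
    ∀ (l acc : List (Int × (String × String))),
      acc.Pairwise (fun a b => pvEdgeKey a < pvEdgeKey b) →
      (l.foldl (fun result e => pvInsertEdge e result) acc).Pairwise
          (fun a b => pvEdgeKey a < pvEdgeKey b) ∧
        (∀ x, x ∈ l.foldl (fun result e => pvInsertEdge e result) acc ↔ x ∈ acc ∨ x ∈ l) := by
  intro l
  induction l with
  | nil => intro acc h; simpa using h
  | cons e t ih =>
    intro acc h
    obtain ⟨hP, hM⟩ := pvInsertEdge_spec e acc h
    obtain ⟨hP', hM'⟩ := ih (pvInsertEdge e acc) hP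
    simp only [List.foldl_cons]
    refine ⟨hP', fun x => ?_⟩
    rw [hM' x, hM x]
    simp only [List.mem_cons]; tauto

-- the nested per-node/per-link loop is the loop over the flattened edge list (for any step g)
theorem pv_nested {σ : Type} (g : σ → (Int × (String × String)) → σ)
    (graph : List (String × List (String × Int))) (a : σ) :
    graph.foldl (fun acc p =>
        p.2.foldl (fun acc link => g acc (link.2, pvNodePair p.1 link.1)) acc) a
      = (graph.flatMap (fun p => p.2.map (fun link => (link.2, pvNodePair p.1 link.1)))).foldl g a := by
  induction graph generalizing a with
  | nil => rfl
  | cons p t ih =>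
    simp only [List.foldl_cons, List.flatMap_cons, List.foldl_append, ih, List.foldl_map]

-- ===== VERDICT (by name: the statement is the Claim_ definition above) =====
theorem sorted_edge_weights_spec : Claim_equal_sorted_edge_weights := by
  intro graph _
  unfold Spec_sorted_edge_weights sorted_edge_weights sorted_edge_weights_alt
  set L := graph.flatMap (fun p => p.2.map (fun link => (link.2, pvNodePair p.1 link.1))) with hL
  have hA : (graph.foldl (fun edges p =>
      p.2.foldl (fun edges link => PySem.Set.add edges (link.2, pvNodePair p.1 link.1)) edges)
      PySem.Set.empty) = PySem.Set.ofList L := by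
    rw [PySem.Set.ofList_eq_foldl]
    exact pv_nested PySem.Set.add graph []
  show PySem.List.sorted (graph.foldl (fun edges p =>
      p.2.foldl (fun edges link => PySem.Set.add edges (link.2, pvNodePair p.1 link.1)) edges)
      PySem.Set.empty) pvEdgeKey false = _
  rw [hA]
  rw [pv_nested (fun result e => pvInsertEdge e result) graph []]
  obtain ⟨hP, hM⟩ := pv_insert_foldl_spec L [] List.Pairwise.nil
  set r := L.foldl (fun result e => pvInsertEdge e result) [] with hr
  have hrnodup : r.Nodup := hP.imp (fun {a b} h => fun heq => absurd (heq ▸ h) (lt_irrefl _))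
  have hperm : r.Perm (PySem.Set.ofList L) := by
    rw [List.perm_ext_iff_of_nodup hrnodup (PySem.Set.nodup_ofList L)]
    intro a
    rw [PySem.Set.mem_ofList, hM a]
    simp
  exact PySem.List.sorted_eq_of_perm_of_pairwise_lt (PySem.Set.ofList L) r pvEdgeKey hperm hP
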